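-- pv_equiv track=rewrite | github.com/aspuru-guzik-group/CompositeMS | benchmark/print_running_time.py | to_tex_mol_name
-- ===== SOURCE A (Python) =====
-- def to_tex_mol_name(hamil_name):
--     res = []
--     hamil_name: str
--     hamil_name = hamil_name.split("/")[-1]
--     in_brace = False
--     for s in hamil_name:
--         if s.isnumeric():
--             if not in_brace:
--                 res.append("_{")
--                 in_brace = True
--         else:
--             if in_brace:
--                 res.append("}")
--                 in_brace = False
--         res.append(s)
--     if in_brace:
--         res.append("}")
--     return "$\\mathrm{"+"".join(res)+"}$"
-- ===== SOURCE B (Python) =====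
-- def to_tex_mol_name(hamil_name):
--     name = hamil_name.split("/")[-1]
--     pieces = []
--     i = 0
--     n = len(name)
--     while i < n:
--         num = name[i].isnumeric()
--         j = i + 1
--         while j < n and name[j].isnumeric() == num:
--             j += 1
--         run = name[i:j]
--         pieces.append("_{" + run + "}" if num else run)
--         i = j
--     return "$\\mathrm{" + "".join(pieces) + "}$"
-- ===== Notes on version B (the rewrite author's own statement) =====
-- stated objective: alternative
-- what changed: Replaces the per-character scan with an in_brace flag and end-of-loop flush by a two-pointer run extraction: each maximal numeric/non-numeric run is taken as a whole and wrapped (or not) as one piece.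
import Mathlib
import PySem

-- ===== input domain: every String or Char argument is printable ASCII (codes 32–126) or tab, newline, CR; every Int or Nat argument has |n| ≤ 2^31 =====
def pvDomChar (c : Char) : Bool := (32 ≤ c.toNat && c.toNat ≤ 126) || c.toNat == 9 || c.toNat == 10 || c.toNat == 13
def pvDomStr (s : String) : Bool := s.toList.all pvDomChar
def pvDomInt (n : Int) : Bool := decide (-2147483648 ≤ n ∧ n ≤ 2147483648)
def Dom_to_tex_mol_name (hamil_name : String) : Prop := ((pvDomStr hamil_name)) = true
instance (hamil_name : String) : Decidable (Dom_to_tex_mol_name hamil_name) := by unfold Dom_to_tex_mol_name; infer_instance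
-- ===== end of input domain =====

-- B replaces A's per-character scan with an in_brace flag by a two-pointer extraction of
-- maximal numeric/non-numeric runs, each wrapped (or not) as one piece; same O(n) cost.
-- On the printable-ASCII domain, Python's str.isnumeric coincides with isdigit; both ports
-- use PySem.Chars.isdigit for it.

-- ===== PORT A =====
-- one step of A's for-loop: state is (res, in_brace)
def aStep (st : List String × Bool) (s : Char) : List String × Bool :=
  if PySem.Chars.isdigit s then
    let st' := if !st.2 then (st.1 ++ ["_{"], true) else st
    (st'.1 ++ [String.ofList [s]], st'.2)
  else
    let st' := if st.2 then (st.1 ++ ["}"], false) else st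
    (st'.1 ++ [String.ofList [s]], st'.2)

def to_tex_mol_name (hamil_name : String) : String :=
  -- hamil_name.split("/")[-1]: split with a nonempty separator is always `some` of a
  -- nonempty list, so the defaults are never used
  let name := ((PySem.Str.split? hamil_name "/").getD []).getLast?.getD ""
  let st := name.toList.foldl aStep ([], false)
  let res := if st.2 then st.1 ++ ["}"] else st.1
  "$\\mathrm{" ++ PySem.Str.join "" res ++ "}$"

-- ===== PORT B =====
-- Source B's two-pointer while loops: peel off the maximal run agreeing with the head's
-- numeric-ness (inner while = takeWhile/dropWhile), recurse on the rest
def bRuns (cs : List Char) : List (Bool × List Char) :=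
  match cs with
  | [] => []
  | c :: rest =>
    let num := PySem.Chars.isdigit c
    (num, c :: rest.takeWhile (fun d => PySem.Chars.isdigit d == num)) ::
      bRuns (rest.dropWhile (fun d => PySem.Chars.isdigit d == num))
termination_by cs.length
decreasing_by
  simp only [List.length_cons]
  exact Nat.lt_succ_of_le (List.length_dropWhile_le _ _)

def to_tex_mol_name_alt (hamil_name : String) : String :=
  let name := ((PySem.Str.split? hamil_name "/").getD []).getLast?.getD ""
  let pieces := (bRuns name.toList).map (fun p =>
    if p.1 then "_{" ++ String.ofList p.2 ++ "}" else String.ofList p.2)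
  "$\\mathrm{" ++ PySem.Str.join "" pieces ++ "}$"

-- ===== PRECONDITION & SPEC =====
def Spec_to_tex_mol_name (hamil_name : String) (out : String) : Prop := out = to_tex_mol_name_alt hamil_name
instance (hamil_name : String) (out : String) : Decidable (Spec_to_tex_mol_name hamil_name out) := by unfold Spec_to_tex_mol_name; infer_instance

-- ===== CLAIM (what is proved, stated in full; the proofs are below) =====
def Claim_equal_to_tex_mol_name : Prop := ∀ (hamil_name : String), Dom_to_tex_mol_name hamil_name → Spec_to_tex_mol_name hamil_name (to_tex_mol_name hamil_name)

-- ===== LEMMAS AND PROOFS =====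

-- the strings A appends after reaching state (·, b), including the final flush
def aRest (cs : List Char) (b : Bool) : List String :=
  match cs with
  | [] => if b then ["}"] else []
  | c :: rest =>
    if PySem.Chars.isdigit c then
      (if b then [] else ["_{"]) ++ [String.ofList [c]] ++ aRest rest true
    else
      (if b then ["}"] else []) ++ [String.ofList [c]] ++ aRest rest false

theorem aFold_eq_aRest (cs : List Char) (res : List String) (b : Bool) :
    (if (cs.foldl aStep (res, b)).2 then (cs.foldl aStep (res, b)).1 ++ ["}"]
     else (cs.foldl aStep (res, b)).1) = res ++ aRest cs b := by
  induction cs generalizing res b with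
  | nil => cases b <;> simp [aRest]
  | cons c rest ih =>
    by_cases h : PySem.Chars.isdigit c = true <;> cases b <;>
      simp [aStep, aRest, h, ih, List.append_assoc]

def charsOf (l : List String) : List Char := (l.map String.toList).flatten

theorem join_empty (parts : List String) :
    (PySem.Str.join "" parts).toList = charsOf parts := by
  rw [PySem.Str.toList_join]
  show PySem.Chars.join [] _ = _
  unfold charsOf
  induction parts with
  | nil => simp [PySem.Chars.join_nil]
  | cons p rest ih =>
    cases rest with
    | nil => simp [PySem.Chars.join_singleton]
    | cons q r => simp only [PySem.Chars.join_cons_cons, List.map_cons, List.flatten_cons] at *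
                  simp [ih]

-- inside a numeric run, A just emits the characters
theorem aRest_digit_run (u d : List Char) (hu : ∀ c ∈ u, PySem.Chars.isdigit c = true) :
    aRest (u ++ d) true = u.map (fun c => String.ofList [c]) ++ aRest d true := by
  induction u with
  | nil => simp
  | cons c rest ih =>
    have hc := hu c (by simp)
    simp [aRest, hc, ih (fun x hx => hu x (by simp [hx]))]

-- at the end of a numeric run (end of string or a non-digit next), A closes the brace
theorem aRest_true_close (d : List Char)
    (hd : d = [] ∨ ∃ x xs, d = x :: xs ∧ PySem.Chars.isdigit x = false) :
    aRest d true = "}" :: aRest d false := by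
  rcases hd with h | ⟨x, xs, rfl, hx⟩
  · simp [h, aRest]
  · simp [aRest, hx]

-- inside a non-numeric run, A just emits the characters
theorem aRest_nondigit_run (u d : List Char) (hu : ∀ c ∈ u, PySem.Chars.isdigit c = false) :
    aRest (u ++ d) false = u.map (fun c => String.ofList [c]) ++ aRest d false := by
  induction u with
  | nil => simp
  | cons c rest ih =>
    have hc := hu c (by simp)
    simp [aRest, hc, ih (fun x hx => hu x (by simp [hx]))]

theorem charsOf_singletons (u : List Char) :
    charsOf (u.map (fun c => String.ofList [c])) = u := by
  induction u with
  | nil => rfl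
  | cons c rest ih =>
    simp only [charsOf, List.map_map] at ih ⊢
    simp [ih]

-- main invariant: the characters A emits equal the characters of B's pieces
theorem aRest_eq_bPieces (cs : List Char) :
    charsOf (aRest cs false) =
      charsOf ((bRuns cs).map (fun p =>
        if p.1 then "_{" ++ String.ofList p.2 ++ "}" else String.ofList p.2)) := by
  induction hn : cs.length using Nat.strong_induction_on generalizing cs with
  | _ n ih =>
  cases cs with
  | nil => rw [bRuns]; simp [aRest, charsOf]
  | cons c rest =>
    rw [bRuns]
    set num := PySem.Chars.isdigit c with hnum
    set t := rest.takeWhile (fun d => PySem.Chars.isdigit d == num) with ht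
    set d := rest.dropWhile (fun d => PySem.Chars.isdigit d == num) with hd
    have hrest : rest = t ++ d := (List.takeWhile_append_dropWhile).symm
    have hdlen : d.length < n := by
      subst hn
      simp only [List.length_cons]
      exact Nat.lt_succ_of_le (List.length_dropWhile_le _ _)
    have ht_all : ∀ x ∈ t, PySem.Chars.isdigit x = num := by
      intro x hx
      have := List.mem_takeWhile_imp (ht ▸ hx)
      simpa using this
    have hd_head : d = [] ∨ ∃ x xs, d = x :: xs ∧ (PySem.Chars.isdigit x == num) = false := by
      cases hdc : d with
      | nil => exact Or.inl rfl
      | cons x xs =>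
        refine Or.inr ⟨x, xs, rfl, ?_⟩
        have := List.head?_dropWhile_not (p := fun d => PySem.Chars.isdigit d == num) (l := rest)
        rw [← hd, hdc] at this
        simpa using this
    have ihd := ih d.length hdlen d rfl
    cases hnv : num with
    | true =>
      -- numeric run: A opens a brace, emits c and t, closes at the boundary
      have h1 : aRest (c :: rest) false =
          "_{" :: String.ofList [c] :: (t.map (fun x => String.ofList [x]) ++ ("}" :: aRest d false)) := by
        rw [hrest]
        show aRest (c :: (t ++ d)) false = _
        rw [aRest]
        have hc : PySem.Chars.isdigit c = true := by rw [← hnum, hnv]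
        rw [if_pos hc]
        have h2 := aRest_digit_run t d (fun x hx => by have := ht_all x hx; rw [this, hnv])
        have h3 : aRest d true = "}" :: aRest d false := by
          apply aRest_true_close
          rcases hd_head with h | ⟨x, xs, hxx, hx⟩
          · exact Or.inl h
          · refine Or.inr ⟨x, xs, hxx, ?_⟩
            rw [hnv] at hx; simpa using hx
        simp [h2, h3]
      rw [h1]
      have h4 : charsOf (t.map (fun x => String.ofList [x])) = t := charsOf_singletons t
      simp only [charsOf, List.map_cons, List.flatten_cons, List.map_map,
        String.toList_ofList] at h4 ihd ⊢
      simp [h4, ihd]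
    | false =>
      have h1 : aRest (c :: rest) false =
          String.ofList [c] :: (t.map (fun x => String.ofList [x]) ++ aRest d false) := by
        rw [hrest]
        show aRest (c :: (t ++ d)) false = _
        rw [aRest]
        have hc : PySem.Chars.isdigit c = false := by rw [← hnum, hnv]
        rw [if_neg (by simp [hc])]
        have h2 := aRest_nondigit_run t d (fun x hx => by have := ht_all x hx; rw [this, hnv])
        simp [h2]
      rw [h1]
      have h4 : charsOf (t.map (fun x => String.ofList [x])) = t := charsOf_singletons t
      simp only [charsOf, List.map_cons, List.flatten_cons, List.map_map,
        String.toList_ofList] at h4 ihd ⊢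
      simp [h4, ihd]

theorem join_eq (cs : List Char) :
    PySem.Str.join "" (aRest cs false) =
      PySem.Str.join "" ((bRuns cs).map (fun p =>
        if p.1 then "_{" ++ String.ofList p.2 ++ "}" else String.ofList p.2)) := by
  have h1 := join_empty (aRest cs false)
  have h2 := join_empty ((bRuns cs).map (fun p =>
        if p.1 then "_{" ++ String.ofList p.2 ++ "}" else String.ofList p.2))
  have := aRest_eq_bPieces cs
  apply String.ext
  rw [h1, h2, this]

-- ===== VERDICT (by name: the statement is the Claim_ definition above) =====
theorem to_tex_mol_name_spec : Claim_equal_to_tex_mol_name := by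
  intro hamil_name _
  unfold Spec_to_tex_mol_name to_tex_mol_name to_tex_mol_name_alt
  have h := aFold_eq_aRest (((PySem.Str.split? hamil_name "/").getD []).getLast?.getD "").toList [] false
  simp only [List.nil_append] at h
  dsimp only
  rw [h, join_eq]
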